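-- pv_equiv track=rewrite | github.com/Mud-Fire/Codewars | BirdMountain.py | peak_height
-- ===== SOURCE A (Python) =====
-- def peak_height(mountain):
--     lX, lY = len(mountain), len(mountain[0])
--     top, lst = 0, [[0] * lY for _ in range(lX)]
--
--     for x, row in enumerate(mountain):
--         for y, v in enumerate(row):
--             lst[x][y] = (v == '^') + (0 < x < lX - 1 and 0 < y < lY - 1 and v == '^' and min(lst[x - 1][y], lst[x][y - 1]))
--             top |= lst[x][y] > 0
--
--     for x in reversed(range(1, lX - 1)):
--         for y in reversed(range(1, lY - 1)):
--             lst[x][y] = min(lst[x][y], lst[x + 1][y] + 1, lst[x][y + 1] + 1)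
--             top += top < lst[x][y]
--
--     return top
-- ===== SOURCE B (Python) =====
-- def peak_height(mountain):
--     # layer-peeling (morphological erosion): repeatedly strip every '^' touching
--     # a gap or the border; the number of rounds is the tallest pyramid height
--     h, w = len(mountain), len(mountain[0])
--     cells = {(x, y) for x in range(h) for y in range(w)
--              if y < len(mountain[x]) and mountain[x][y] == '^'}
--     height = 0
--     while cells:
--         cells = {(x, y) for (x, y) in cells
--                  if (x - 1, y) in cells and (x + 1, y) in cells
--                  and (x, y - 1) in cells and (x, y + 1) in cells}
--         height += 1
--     return height
-- ===== Notes on version B (the rewrite author's own statement) =====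
-- stated objective: alternative
-- what changed: Replaces A's two chamfer sweeps over a mutable 2D array with a ramped counter by morphological layer-peeling: build the set of '^' coordinates and repeatedly erode every cell missing one of its four neighbours, counting rounds; the round count is the tallest pyramid height.
import Mathlib
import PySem

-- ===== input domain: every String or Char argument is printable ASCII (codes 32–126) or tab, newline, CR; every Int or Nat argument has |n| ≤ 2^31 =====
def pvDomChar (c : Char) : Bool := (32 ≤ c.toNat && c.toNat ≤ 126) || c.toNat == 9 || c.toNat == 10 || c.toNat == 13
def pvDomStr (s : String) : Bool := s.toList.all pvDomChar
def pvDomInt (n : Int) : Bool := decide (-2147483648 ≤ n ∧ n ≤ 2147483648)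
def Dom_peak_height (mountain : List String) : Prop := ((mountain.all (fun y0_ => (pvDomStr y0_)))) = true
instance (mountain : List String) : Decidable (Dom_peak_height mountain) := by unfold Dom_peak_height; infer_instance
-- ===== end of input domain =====

-- B replaces A's two chamfer sweeps over a mutable 2D array (with a ramped
-- counter) by morphological layer-peeling: erode the set of '^' coordinates
-- until empty and count the rounds; same return value on every input A accepts.

-- ===== PORT A =====
-- lst[x][y] read / write (indices are in range on every Pre_-admitted input)
def pvGet2 (g : List (List Int)) (x y : Nat) : Int := (g.getD x []).getD y 0
def pvSet2 (g : List (List Int)) (x y : Nat) (v : Int) : List (List Int) :=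
  g.modify x (fun r => r.set y v)

-- body of the first loop: lst[x][y] = (v=='^') + (…and min(…)); top |= lst[x][y] > 0
-- (top stays in {0,1} during this loop, so `top |= b` is `if b then 1 else top`)
def pvFwdStepA (h w x : Nat) (st : List (List Int) × Int) (vy : Char × Nat) :
    List (List Int) × Int :=
  let y := vy.2
  let v := vy.1
  let e : Int := (if v = '^' then 1 else 0) +
    (if 0 < x ∧ x < h - 1 ∧ 0 < y ∧ y < w - 1 ∧ v = '^' then
       min (pvGet2 st.1 (x - 1) y) (pvGet2 st.1 x (y - 1)) else 0)
  (pvSet2 st.1 x y e, if 0 < e then 1 else st.2)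

-- for x, row in enumerate(mountain): for y, v in enumerate(row): …
def pvFwdA (h w : Nat) (st : List (List Int) × Int) (m : List String) :
    List (List Int) × Int :=
  m.zipIdx.foldl (fun st rx => rx.1.toList.zipIdx.foldl (pvFwdStepA h w rx.2) st) st

-- body of the second loop: lst[x][y] = min(…); top += top < lst[x][y]
def pvBackStepA (x : Nat) (st : List (List Int) × Int) (y : Nat) :
    List (List Int) × Int :=
  let v := min (min (pvGet2 st.1 x y) (pvGet2 st.1 (x + 1) y + 1)) (pvGet2 st.1 x (y + 1) + 1)
  (pvSet2 st.1 x y v, st.2 + (if st.2 < v then 1 else 0))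

-- for x in reversed(range(1, lX - 1)): for y in reversed(range(1, lY - 1)): …
def pvBackA (h w : Nat) (st : List (List Int) × Int) : List (List Int) × Int :=
  (List.range' 1 (h - 2)).reverse.foldl
    (fun st x => (List.range' 1 (w - 2)).reverse.foldl (pvBackStepA x) st) st

def peak_height (mountain : List String) : Int :=
  match mountain with
  | [] => 0      -- Python raises IndexError on mountain[0]; excluded by Pre_peak_height
  | m0 :: _ =>
    (pvBackA mountain.length m0.length
      (pvFwdA mountain.length m0.length
        (List.replicate mountain.length (List.replicate m0.length 0), 0) mountain)).2

-- ===== PORT B =====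
-- cells = {(x, y) for x in range(h) for y in range(w)
--          if y < len(mountain[x]) and mountain[x][y] == '^'}
def pvCellsB (mountain : List String) (h w : Int) : List (Int × Int) :=
  PySem.Set.ofList ((PySem.List.pyRange 0 h 1).flatMap (fun x =>
    ((PySem.List.pyRange 0 w 1).filter (fun y =>
        decide (y < PySem.Str.len (PySem.List.pyGetD mountain x "")) &&
        (PySem.Str.pyGet? (PySem.List.pyGetD mountain x "") y == some '^'))).map
      (fun y => (x, y))))

-- one round of the loop body: keep the cells whose four neighbours are all present
def pvErode (cells : List (Int × Int)) : List (Int × Int) :=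
  PySem.Set.ofList (cells.filter (fun p =>
    PySem.Set.contains cells (p.1 - 1, p.2) && PySem.Set.contains cells (p.1 + 1, p.2) &&
    PySem.Set.contains cells (p.1, p.2 - 1) && PySem.Set.contains cells (p.1, p.2 + 1)))

-- while cells: cells = erode(cells); height += 1
-- (fuel |cells|+1 only totalises the loop: each round strictly shrinks a
-- non-empty set, proved in pvErode_length_lt below)
def pvErodeLoop : Nat → List (Int × Int) → Int → Int
  | 0, _, height => height
  | n + 1, cells, height =>
    if cells = [] then height else pvErodeLoop n (pvErode cells) (height + 1)

def peak_height_alt (mountain : List String) : Int :=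
  match mountain with
  | [] => 0      -- Python raises IndexError on mountain[0]; excluded by Pre_peak_height
  | m0 :: _ =>
    let cells := pvCellsB mountain (mountain.length : Int) (m0.length : Int)
    pvErodeLoop (cells.length + 1) cells 0

-- ===== PRECONDITION & SPEC =====
-- Pre_ excludes exactly the inputs on which A raises IndexError: the empty list
-- (mountain[0]) and grids where some row is longer than the first (lst[x][y] write).
def Pre_peak_height (mountain : List String) : Prop :=
  mountain ≠ [] ∧ ∀ r ∈ mountain, r.length ≤ (mountain.headD "").length
instance (mountain : List String) : Decidable (Pre_peak_height mountain) := by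
  unfold Pre_peak_height; infer_instance

def pvWitness_peak_height : List String := ["^^^", ".^.", "..."]

def Spec_peak_height (mountain : List String) (out : Int) : Prop := out = peak_height_alt mountain
instance (mountain : List String) (out : Int) : Decidable (Spec_peak_height mountain out) := by
  unfold Spec_peak_height; infer_instance

-- ===== CLAIM (what is proved, stated in full; the proofs are below) =====
def Claim_equal_peak_height : Prop := ∀ (mountain : List String), Dom_peak_height mountain → Pre_peak_height mountain → Spec_peak_height mountain (peak_height mountain)


-- ===== LEMMAS AND PROOFS =====

-- The common mathematical field description both ports are reduced to.
-- `rows` is mountain seen as char lists, `h`/`w` the height and first-row width.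

-- the cell predicate: '^' at (x, y) (False outside the stored characters)
def pvCell (rows : List (List Char)) (x y : Nat) : Bool :=
  (rows.getD x []).getD y ' ' == '^'

-- A's forward-pass field, exactly A's first-loop recurrence
def pvFA (rows : List (List Char)) (h w : Nat) : Nat → Nat → Int
  | x, y =>
    (if pvCell rows x y then (1 : Int) else 0) +
    (if _hc : 0 < x ∧ x < h - 1 ∧ 0 < y ∧ y < w - 1 ∧ pvCell rows x y = true then
        min (pvFA rows h w (x - 1) y) (pvFA rows h w x (y - 1))
      else 0)
  termination_by x y => x + y
  decreasing_by all_goals omega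

-- the forward-pass field with a uniform virtual-zero border
def pvFB (rows : List (List Char)) : Nat → Nat → Int
  | x, y =>
    if pvCell rows x y then
      1 + min (if _hx : x = 0 then 0 else pvFB rows (x - 1) y)
              (if _hy : y = 0 then 0 else pvFB rows x (y - 1))
    else 0
  termination_by x y => x + y
  decreasing_by all_goals omega

-- A's final field (backward interior sweep applied to pvFA)
def pvGA (rows : List (List Char)) (h w : Nat) : Nat → Nat → Int
  | x, y =>
    if _hb : x = 0 ∨ y = 0 ∨ ¬ x + 1 < h ∨ ¬ y + 1 < w then pvFA rows h w x y
    else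
      min (pvFA rows h w x y)
        (min (pvGA rows h w (x + 1) y + 1) (pvGA rows h w x (y + 1) + 1))
  termination_by x y => (h - x) + (w - y)
  decreasing_by all_goals omega

-- the final field (backward sweep with virtual-zero border applied to pvFB)
def pvGB (rows : List (List Char)) (h w : Nat) : Nat → Nat → Int
  | x, y =>
    min (pvFB rows x y)
      (min ((if _hx : x + 1 < h then pvGB rows h w (x + 1) y else 0) + 1)
           ((if _hy : y + 1 < w then pvGB rows h w x (y + 1) else 0) + 1))
  termination_by x y => (h - x) + (w - y)
  decreasing_by all_goals omega

-- the maximum of the final field (and 0)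
def pvM (rows : List (List Char)) (h w : Nat) : Int :=
  ((List.range h).flatMap (fun x => (List.range w).map (fun y => pvGB rows h w x y))).foldl max 0

def pvHasCell (rows : List (List Char)) : Prop := ∃ x y, pvCell rows x y = true

-- ---- grid access lemmas ----
theorem pvSet2_length (g : List (List Int)) (x y : Nat) (v : Int) :
    (pvSet2 g x y v).length = g.length := by
  simp [pvSet2]

theorem pvSet2_row (g : List (List Int)) (x y X : Nat) (v : Int) (hx : x < g.length) :
    (pvSet2 g x y v).getD X [] = if X = x then (g.getD x []).set y v else g.getD X [] := by
  unfold pvSet2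
  rcases eq_or_ne X x with rfl | hne
  · rw [if_pos rfl]
    simp only [List.getD_eq_getElem?_getD, List.getElem?_modify,
      List.getElem?_eq_getElem hx]
    simp
  · rw [if_neg hne]
    have hxX : x ≠ X := Ne.symm hne
    simp only [List.getD_eq_getElem?_getD, List.getElem?_modify]
    rcases hgX : g[X]? with _ | r
    · simp
    · simp [hxX]

theorem pvGet2_set (g : List (List Int)) (x y X Y : Nat) (v : Int)
    (hx : x < g.length) (hy : y < (g.getD x []).length) :
    pvGet2 (pvSet2 g x y v) X Y = if X = x ∧ Y = y then v else pvGet2 g X Y := by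
  unfold pvGet2
  rw [pvSet2_row g x y X v hx]
  rcases eq_or_ne X x with rfl | hne
  · rw [if_pos rfl]
    rcases eq_or_ne Y y with rfl | hne'
    · rw [if_pos ⟨rfl, rfl⟩]
      rw [List.getD_eq_getElem?_getD, List.getElem?_set, if_pos rfl, if_pos hy]
      rfl
    · rw [if_neg (by tauto)]
      rw [List.getD_eq_getElem?_getD, List.getElem?_set, if_neg (Ne.symm hne'),
        ← List.getD_eq_getElem?_getD]
  · rw [if_neg hne, if_neg (by tauto)]

theorem pvSet2_rowlen (g : List (List Int)) (x y X : Nat) (v : Int) (hx : x < g.length) :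
    ((pvSet2 g x y v).getD X []).length = (g.getD X []).length := by
  rw [pvSet2_row g x y X v hx]
  rcases eq_or_ne X x with rfl | hne
  · simp
  · simp [hne]

-- ---- field basics ----
theorem pvFA_nonneg (rows : List (List Char)) (h w x y : Nat) :
    0 ≤ pvFA rows h w x y := by
  have H : ∀ (n x y : Nat), x + y ≤ n → 0 ≤ pvFA rows h w x y := by
    intro n
    induction n with
    | zero =>
      intro x y hxy
      rw [pvFA]
      split <;> split <;> omega
    | succ n ih =>
      intro x y hxy
      rw [pvFA]
      have h2 : (0:Int) ≤
          (if _hc : 0 < x ∧ x < h - 1 ∧ 0 < y ∧ y < w - 1 ∧ pvCell rows x y = true then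
            min (pvFA rows h w (x - 1) y) (pvFA rows h w x (y - 1)) else 0) := by
        split
        · rename_i hc
          exact le_min (ih (x-1) y (by omega)) (ih x (y-1) (by omega))
        · omega
      split <;> omega
  exact H (x + y) x y le_rfl

theorem pvFB_nonneg (rows : List (List Char)) (x y : Nat) :
    0 ≤ pvFB rows x y := by
  have H : ∀ (n x y : Nat), x + y ≤ n → 0 ≤ pvFB rows x y := by
    intro n
    induction n with
    | zero =>
      intro x y hxy
      rw [pvFB]
      split
      · rw [dif_pos (by omega : x = 0), dif_pos (by omega : y = 0)]; omega
      · omega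
    | succ n ih =>
      intro x y hxy
      rw [pvFB]
      split
      · have h1 : (0:Int) ≤ (if _hx : x = 0 then 0 else pvFB rows (x - 1) y) := by
          split
          · omega
          · rename_i hx; exact ih (x-1) y (by omega)
        have h2 : (0:Int) ≤ (if _hy : y = 0 then 0 else pvFB rows x (y - 1)) := by
          split
          · omega
          · rename_i hy; exact ih x (y-1) (by omega)
        have := le_min h1 h2; omega
      · omega
  exact H (x + y) x y le_rfl

theorem pvGB_nonneg (rows : List (List Char)) (h w x y : Nat) :
    0 ≤ pvGB rows h w x y := by
  have H : ∀ (n x y : Nat), (h - x) + (w - y) ≤ n → 0 ≤ pvGB rows h w x y := by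
    intro n
    induction n with
    | zero =>
      intro x y hn
      rw [pvGB, dif_neg (by omega), dif_neg (by omega)]
      exact le_min (pvFB_nonneg rows x y) (le_min (by norm_num) (by norm_num))
    | succ n ih =>
      intro x y hn
      rw [pvGB]
      have h2 : (0:Int) ≤ (if _hx : x + 1 < h then pvGB rows h w (x + 1) y else 0) + 1 := by
        split
        · rename_i hx; have := ih (x+1) y (by omega); omega
        · omega
      have h3 : (0:Int) ≤ (if _hy : y + 1 < w then pvGB rows h w x (y + 1) else 0) + 1 := by
        split
        · rename_i hy; have := ih x (y+1) (by omega); omega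
        · omega
      exact le_min (pvFB_nonneg rows x y) (le_min h2 h3)
  exact H ((h - x) + (w - y)) x y le_rfl

theorem pvGA_boundary (rows : List (List Char)) (h w x y : Nat)
    (hb : x = 0 ∨ y = 0 ∨ ¬ x + 1 < h ∨ ¬ y + 1 < w) :
    pvGA rows h w x y = pvFA rows h w x y := by
  rw [pvGA, dif_pos hb]

theorem pvGA_interior (rows : List (List Char)) (h w x y : Nat)
    (hx : 0 < x) (hx2 : x + 1 < h) (hy : 0 < y) (hy2 : y + 1 < w) :
    pvGA rows h w x y =
      min (pvFA rows h w x y)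
        (min (pvGA rows h w (x + 1) y + 1) (pvGA rows h w x (y + 1) + 1)) := by
  rw [pvGA, dif_neg (by omega)]

theorem pvGA_nonneg (rows : List (List Char)) (h w x y : Nat) :
    0 ≤ pvGA rows h w x y := by
  have H : ∀ (n x y : Nat), (h - x) + (w - y) ≤ n → 0 ≤ pvGA rows h w x y := by
    intro n
    induction n with
    | zero =>
      intro x y hn
      rw [pvGA_boundary rows h w x y (by omega)]
      exact pvFA_nonneg rows h w x y
    | succ n ih =>
      intro x y hn
      by_cases hb : x = 0 ∨ y = 0 ∨ ¬ x + 1 < h ∨ ¬ y + 1 < w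
      · rw [pvGA_boundary rows h w x y hb]; exact pvFA_nonneg rows h w x y
      · push_neg at hb
        obtain ⟨hx0, hy0, hxh, hyw⟩ := hb
        rw [pvGA_interior rows h w x y (by omega) hxh (by omega) hyw]
        have d1 := ih (x+1) y (by omega)
        have d2 := ih x (y+1) (by omega)
        exact le_min (pvFA_nonneg rows h w x y) (le_min (by omega) (by omega))
  exact H ((h - x) + (w - y)) x y le_rfl

-- boundary / cell evaluations of the forward fields
theorem pvFA_boundary (rows : List (List Char)) (h w x y : Nat)
    (hb : ¬ (0 < x ∧ x < h - 1 ∧ 0 < y ∧ y < w - 1)) :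
    pvFA rows h w x y = if pvCell rows x y then 1 else 0 := by
  rw [pvFA, dif_neg (by tauto)]
  omega

theorem pvFA_of_not_cell (rows : List (List Char)) (h w x y : Nat)
    (hc : pvCell rows x y = false) :
    pvFA rows h w x y = 0 := by
  rw [pvFA, if_neg (by simp [hc]), dif_neg (by simp [hc])]
  norm_num

theorem pvFA_pos_of_cell (rows : List (List Char)) (h w x y : Nat)
    (hc : pvCell rows x y = true) :
    1 ≤ pvFA rows h w x y := by
  rw [pvFA, if_pos hc]
  have h2 : (0:Int) ≤
      (if _hc : 0 < x ∧ x < h - 1 ∧ 0 < y ∧ y < w - 1 ∧ pvCell rows x y = true then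
        min (pvFA rows h w (x - 1) y) (pvFA rows h w x (y - 1)) else 0) := by
    split
    · exact le_min (pvFA_nonneg rows h w (x-1) y) (pvFA_nonneg rows h w x (y-1))
    · omega
  omega

theorem pvFB_of_not_cell (rows : List (List Char)) (x y : Nat)
    (hc : pvCell rows x y = false) :
    pvFB rows x y = 0 := by
  rw [pvFB, if_neg (by simp [hc])]

theorem pvFB_pos_of_cell (rows : List (List Char)) (x y : Nat)
    (hc : pvCell rows x y = true) :
    1 ≤ pvFB rows x y := by
  rw [pvFB, if_pos hc]
  have h1 : (0:Int) ≤ (if _hx : x = 0 then 0 else pvFB rows (x - 1) y) := by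
    split
    · omega
    · exact pvFB_nonneg rows (x-1) y
  have h2 : (0:Int) ≤ (if _hy : y = 0 then 0 else pvFB rows x (y - 1)) := by
    split
    · omega
    · exact pvFB_nonneg rows x (y-1)
  have := le_min h1 h2
  omega

theorem pvFB_x0 (rows : List (List Char)) (y : Nat) :
    pvFB rows 0 y = if pvCell rows 0 y then 1 else 0 := by
  rw [pvFB, dif_pos rfl]
  by_cases hc : pvCell rows 0 y = true
  · rw [if_pos hc, if_pos hc]
    have h2 : (0:Int) ≤ (if _hy : y = 0 then 0 else pvFB rows 0 (y - 1)) := by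
      split
      · omega
      · exact pvFB_nonneg rows 0 (y-1)
    rw [min_eq_left h2]; omega
  · rw [if_neg hc, if_neg hc]

theorem pvFB_y0 (rows : List (List Char)) (x : Nat) :
    pvFB rows x 0 = if pvCell rows x 0 then 1 else 0 := by
  rw [pvFB]
  conv_lhs => rw [dif_pos rfl]
  by_cases hc : pvCell rows x 0 = true
  · rw [if_pos hc, if_pos hc]
    have h1 : (0:Int) ≤ (if _hx : x = 0 then 0 else pvFB rows (x - 1) 0) := by
      split
      · omega
      · exact pvFB_nonneg rows (x-1) 0
    rw [min_eq_right h1]; omega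
  · rw [if_neg hc, if_neg hc]

theorem pvGB_pos_of_cell (rows : List (List Char)) (h w x y : Nat)
    (hc : pvCell rows x y = true) :
    1 ≤ pvGB rows h w x y := by
  rw [pvGB]
  have h2 : (1:Int) ≤ (if _hx : x + 1 < h then pvGB rows h w (x + 1) y else 0) + 1 := by
    split
    · have := pvGB_nonneg rows h w (x+1) y; omega
    · omega
  have h3 : (1:Int) ≤ (if _hy : y + 1 < w then pvGB rows h w x (y + 1) else 0) + 1 := by
    split
    · have := pvGB_nonneg rows h w x (y+1); omega
    · omega
  exact le_min (pvFB_pos_of_cell rows x y hc) (le_min h2 h3)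

theorem pvGB_of_not_cell (rows : List (List Char)) (h w x y : Nat)
    (hc : pvCell rows x y = false) :
    pvGB rows h w x y = 0 := by
  rw [pvGB]
  refine le_antisymm ?_ ?_
  · calc min (pvFB rows x y) _ ≤ pvFB rows x y := min_le_left _ _
      _ = 0 := pvFB_of_not_cell rows x y hc
  · have h2 : (0:Int) ≤ (if _hx : x + 1 < h then pvGB rows h w (x + 1) y else 0) + 1 := by
      split
      · have := pvGB_nonneg rows h w (x+1) y; omega
      · omega
    have h3 : (0:Int) ≤ (if _hy : y + 1 < w then pvGB rows h w x (y + 1) else 0) + 1 := by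
      split
      · have := pvGB_nonneg rows h w x (y+1); omega
      · omega
    have h1 : (0:Int) ≤ pvFB rows x y := pvFB_nonneg rows x y
    exact le_min h1 (le_min h2 h3)

theorem pvGA_le_one_of_not_interior (rows : List (List Char)) (h w x y : Nat)
    (hb : ¬ (0 < x ∧ x + 1 < h ∧ 0 < y ∧ y + 1 < w)) :
    pvGA rows h w x y ≤ 1 := by
  rw [pvGA_boundary rows h w x y (by omega), pvFA_boundary rows h w x y (by omega)]
  split <;> omega

theorem pvGA_of_not_cell (rows : List (List Char)) (h w x y : Nat)
    (hc : pvCell rows x y = false) :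
    pvGA rows h w x y = 0 := by
  by_cases hb : x = 0 ∨ y = 0 ∨ ¬ x + 1 < h ∨ ¬ y + 1 < w
  · rw [pvGA_boundary rows h w x y hb]
    exact pvFA_of_not_cell rows h w x y hc
  · push_neg at hb
    obtain ⟨hx0, hy0, hxh, hyw⟩ := hb
    rw [pvGA_interior rows h w x y (by omega) hxh (by omega) hyw]
    refine le_antisymm ?_ ?_
    · calc min (pvFA rows h w x y) _ ≤ pvFA rows h w x y := min_le_left _ _
        _ = 0 := pvFA_of_not_cell rows h w x y hc
    · have d1 := pvGA_nonneg rows h w (x+1) y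
      have d2 := pvGA_nonneg rows h w x (y+1)
      exact le_min (by rw [pvFA_of_not_cell rows h w x y hc]) (le_min (by omega) (by omega))

theorem pvCell_lt (rows : List (List Char)) (w x y : Nat)
    (hw : ∀ r ∈ rows, r.length ≤ w) (hc : pvCell rows x y = true) :
    x < rows.length ∧ y < w := by
  unfold pvCell at hc
  have hx : x < rows.length := by
    by_contra hx
    have hrow : rows.getD x [] = [] := List.getD_eq_default _ _ (by omega)
    rw [hrow] at hc
    simp at hc
  refine ⟨hx, ?_⟩
  have hy : y < (rows.getD x []).length := by
    by_contra hy
    have hch : (rows.getD x []).getD y ' ' = ' ' := List.getD_eq_default _ _ (by omega)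
    rw [hch] at hc
    exact absurd hc (by decide)
  have hmem : rows.getD x [] ∈ rows := by
    rw [List.getD_eq_getElem rows [] hx]
    exact List.getElem_mem hx
  exact lt_of_lt_of_le hy (hw _ hmem)

-- ---- the two forward fields agree away from the bottom/right border ----
theorem pvFA_eq_pvFB (rows : List (List Char)) (h w : Nat) :
    ∀ (x y : Nat), (x = 0 ∨ y = 0 ∨ (x + 1 < h ∧ y + 1 < w)) →
      pvFA rows h w x y = pvFB rows x y := by
  have H : ∀ (n x y : Nat), x + y ≤ n → (x = 0 ∨ y = 0 ∨ (x + 1 < h ∧ y + 1 < w)) →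
      pvFA rows h w x y = pvFB rows x y := by
    intro n
    induction n with
    | zero =>
      intro x y hn _
      have hx : x = 0 := by omega
      have hy : y = 0 := by omega
      subst hx; subst hy
      rw [pvFA_boundary rows h w 0 0 (by omega), pvFB_x0]
    | succ n ih =>
      intro x y hn hcase
      by_cases hc : pvCell rows x y = true
      · rcases Nat.eq_zero_or_pos x with hx0 | hx0
        · subst hx0
          rw [pvFA_boundary rows h w 0 y (by omega), pvFB_x0]
        rcases Nat.eq_zero_or_pos y with hy0 | hy0
        · subst hy0
          rw [pvFA_boundary rows h w x 0 (by omega), pvFB_y0]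
        have hint : x + 1 < h ∧ y + 1 < w := by
          rcases hcase with h1 | h2 | h3
          · omega
          · omega
          · exact h3
        have hA : pvFA rows h w (x-1) y = pvFB rows (x-1) y := by
          refine ih (x-1) y (by omega) ?_
          rcases Nat.eq_zero_or_pos (x-1) with h' | h'
          · exact Or.inl h'
          · exact Or.inr (Or.inr ⟨by omega, by omega⟩)
        have hB : pvFA rows h w x (y-1) = pvFB rows x (y-1) := by
          refine ih x (y-1) (by omega) ?_
          rcases Nat.eq_zero_or_pos (y-1) with h' | h'
          · exact Or.inr (Or.inl h')
          · exact Or.inr (Or.inr ⟨by omega, by omega⟩)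
        rw [pvFA, dif_pos ⟨hx0, by omega, hy0, by omega, hc⟩, if_pos hc]
        rw [pvFB, if_pos hc, dif_neg (by omega), dif_neg (by omega)]
        rw [hA, hB]
      · rw [pvFA_of_not_cell rows h w x y (by simpa using hc),
            pvFB_of_not_cell rows x y (by simpa using hc)]
  intro x y hcase
  exact H (x + y) x y le_rfl hcase

-- the final B field is 0/1 on the border (and off the grid)
theorem pvGB_boundary (rows : List (List Char)) (h w x y : Nat)
    (hb : x = 0 ∨ y = 0 ∨ ¬ x + 1 < h ∨ ¬ y + 1 < w) :
    pvGB rows h w x y = if pvCell rows x y then 1 else 0 := by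
  by_cases hc : pvCell rows x y = true
  · rw [if_pos hc]
    refine le_antisymm ?_ (pvGB_pos_of_cell rows h w x y hc)
    rcases hb with hb | hb | hb | hb
    · subst hb
      calc pvGB rows h w 0 y ≤ pvFB rows 0 y := by rw [pvGB]; exact min_le_left _ _
        _ = 1 := by rw [pvFB_x0, if_pos hc]
    · subst hb
      calc pvGB rows h w x 0 ≤ pvFB rows x 0 := by rw [pvGB]; exact min_le_left _ _
        _ = 1 := by rw [pvFB_y0, if_pos hc]
    · rw [pvGB, dif_neg hb]
      calc min (pvFB rows x y) (min ((0:Int) + 1) _) ≤ min ((0:Int)+1) _ := min_le_right _ _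
        _ ≤ (0:Int) + 1 := min_le_left _ _
        _ = 1 := by norm_num
    · rw [pvGB, dif_neg hb]
      calc min (pvFB rows x y) (min _ ((0:Int) + 1)) ≤ min _ ((0:Int)+1) := min_le_right _ _
        _ ≤ (0:Int) + 1 := min_le_right _ _
        _ = 1 := by norm_num
  · rw [if_neg hc]
    exact pvGB_of_not_cell rows h w x y (by simpa using hc)

-- ---- the two final fields agree everywhere ----
theorem pvGA_eq_pvGB (rows : List (List Char)) (h w : Nat) :
    ∀ (x y : Nat), pvGA rows h w x y = pvGB rows h w x y := by
  have H : ∀ (n x y : Nat), (h - x) + (w - y) ≤ n → pvGA rows h w x y = pvGB rows h w x y := by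
    intro n
    induction n with
    | zero =>
      intro x y hn
      rw [pvGA_boundary rows h w x y (by omega), pvGB_boundary rows h w x y (by omega),
        pvFA_boundary rows h w x y (by omega)]
    | succ n ih =>
      intro x y hn
      by_cases hb : x = 0 ∨ y = 0 ∨ ¬ x + 1 < h ∨ ¬ y + 1 < w
      · rw [pvGA_boundary rows h w x y hb, pvGB_boundary rows h w x y hb,
          pvFA_boundary rows h w x y (by omega)]
      · push_neg at hb
        obtain ⟨hx0, hy0, hxh, hyw⟩ := hb
        rw [pvGA_interior rows h w x y (by omega) hxh (by omega) hyw]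
        rw [pvGB, dif_pos hxh, dif_pos hyw]
        rw [pvFA_eq_pvFB rows h w x y (by right; right; exact ⟨hxh, hyw⟩)]
        rw [ih (x+1) y (by omega), ih x (y+1) (by omega)]
  intro x y
  exact H ((h - x) + (w - y)) x y le_rfl

-- ---- foldl max toolbox ----
theorem pvLe_foldlMax_init (l : List Int) : ∀ (i : Int), i ≤ l.foldl max i := by
  induction l with
  | nil => intro i; simp
  | cons a l ih =>
    intro i
    simp only [List.foldl_cons]
    exact le_trans (le_max_left i a) (ih _)

theorem pvLe_foldlMax_mem (l : List Int) : ∀ (i a : Int), a ∈ l → a ≤ l.foldl max i := by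
  induction l with
  | nil => intro i a ha; simp at ha
  | cons b l ih =>
    intro i a ha
    simp only [List.foldl_cons]
    rcases List.mem_cons.mp ha with rfl | ha
    · exact le_trans (le_max_right i a) (pvLe_foldlMax_init l _)
    · exact ih _ a ha

theorem pvFoldlMax_attain (l : List Int) : ∀ (i : Int), l.foldl max i = i ∨ l.foldl max i ∈ l := by
  induction l with
  | nil => intro i; left; simp
  | cons a l ih =>
    intro i
    simp only [List.foldl_cons]
    rcases ih (max i a) with hv | hv
    · rw [hv]
      rcases max_cases i a with ⟨he, _⟩ | ⟨he, _⟩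
      · left; exact he
      · right; rw [he]; simp
    · right; simp [hv]

-- ---- properties of the field maximum pvM ----
theorem pvM_nonneg (rows : List (List Char)) (h w : Nat) : 0 ≤ pvM rows h w :=
  pvLe_foldlMax_init _ 0

theorem pvGB_le_pvM (rows : List (List Char)) (h w x y : Nat) (hx : x < h) (hy : y < w) :
    pvGB rows h w x y ≤ pvM rows h w := by
  refine pvLe_foldlMax_mem _ 0 _ ?_
  simp only [List.mem_flatMap, List.mem_map, List.mem_range]
  exact ⟨x, hx, y, hy, rfl⟩

theorem pvM_attain (rows : List (List Char)) (h w : Nat) :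
    pvM rows h w = 0 ∨ ∃ x, x < h ∧ ∃ y, y < w ∧ pvGB rows h w x y = pvM rows h w := by
  rcases pvFoldlMax_attain
      ((List.range h).flatMap (fun x => (List.range w).map (fun y => pvGB rows h w x y))) 0 with
    hv | hv
  · left; exact hv
  · right
    simp only [List.mem_flatMap, List.mem_map, List.mem_range] at hv
    obtain ⟨x, hx, y, hy, he⟩ := hv
    exact ⟨x, hx, y, hy, he⟩

theorem pvM_pos_of_cell (rows : List (List Char)) (h w : Nat)
    (hrows : rows.length = h) (hw : ∀ r ∈ rows, r.length ≤ w)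
    (x y : Nat) (hc : pvCell rows x y = true) :
    1 ≤ pvM rows h w := by
  obtain ⟨hx, hy⟩ := pvCell_lt rows w x y hw hc
  exact le_trans (pvGB_pos_of_cell rows h w x y hc)
    (pvGB_le_pvM rows h w x y (by omega) hy)

-- ---- bookkeeping helpers for the sweep invariants ----
def pvRows (m : List String) : List (List Char) := m.map String.toList

theorem pvRows_getD (m : List String) (k : Nat) :
    (pvRows m).getD k [] = (m.getD k "").toList := by
  unfold pvRows
  rcases Nat.lt_or_ge k m.length with hk | hk
  · rw [List.getD_eq_getElem _ _ (by simpa using hk), List.getD_eq_getElem _ _ hk,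
      List.getElem_map]
  · rw [List.getD_eq_default _ _ (by simpa using hk), List.getD_eq_default _ _ hk]
    rfl

theorem pvCell_bounds (rows : List (List Char)) (x y : Nat)
    (hc : pvCell rows x y = true) :
    x < rows.length ∧ y < (rows.getD x []).length := by
  constructor
  · by_contra hx
    have hrow : rows.getD x [] = [] := List.getD_eq_default _ _ (by omega)
    unfold pvCell at hc
    rw [hrow] at hc
    simp at hc
  · by_contra hy
    have hch : (rows.getD x []).getD y ' ' = ' ' := List.getD_eq_default _ _ (by omega)
    unfold pvCell at hc
    rw [hch] at hc
    exact absurd hc (by decide)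

-- change the bookkeeping predicate of the forward-grid invariant
theorem pvGpropConv (rows : List (List Char)) (h w : Nat) (g : List (List Int))
    (P Q : Nat → Nat → Prop) [∀ X Y, Decidable (P X Y)] [∀ X Y, Decidable (Q X Y)]
    (hagree : ∀ X Y, pvCell rows X Y = true → (P X Y ↔ Q X Y))
    (hg : ∀ X Y, pvGet2 g X Y = if P X Y then pvFA rows h w X Y else 0) :
    ∀ X Y, pvGet2 g X Y = if Q X Y then pvFA rows h w X Y else 0 := by
  intro X Y
  rw [hg X Y]
  by_cases hc : pvCell rows X Y = true
  · exact if_congr (hagree X Y hc) rfl rfl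
  · rw [pvFA_of_not_cell rows h w X Y (by simpa using hc), ite_self, ite_self]

theorem pvExConv (rows : List (List Char)) (P Q : Nat → Nat → Prop)
    (hagree : ∀ X Y, pvCell rows X Y = true → (P X Y ↔ Q X Y)) :
    (∃ X Y, P X Y ∧ pvCell rows X Y = true) ↔ (∃ X Y, Q X Y ∧ pvCell rows X Y = true) := by
  constructor
  · rintro ⟨X, Y, hP, hc⟩; exact ⟨X, Y, (hagree X Y hc).mp hP, hc⟩
  · rintro ⟨X, Y, hQ, hc⟩; exact ⟨X, Y, (hagree X Y hc).mpr hQ, hc⟩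

-- ---- the first loop of A computes pvFA and flags the existence of a '^' ----
theorem pvAfwdInner (m : List String) (h w k : Nat)
    (hh : h = m.length) (hw : ∀ r ∈ m, r.length ≤ w) (hk : k < m.length) :
    ∀ (l : List Char) (j : Nat) (g : List (List Int)) (t : Int),
    l = ((pvRows m).getD k []).drop j →
    g.length = h →
    (∀ X, X < h → (g.getD X []).length = w) →
    (∀ X Y, pvGet2 g X Y =
      if X < k ∨ (X = k ∧ Y < j) then pvFA (pvRows m) h w X Y else 0) →
    ((∃ X Y, (X < k ∨ (X = k ∧ Y < j)) ∧ pvCell (pvRows m) X Y = true) → t = 1) →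
    ((¬ ∃ X Y, (X < k ∨ (X = k ∧ Y < j)) ∧ pvCell (pvRows m) X Y = true) → t = 0) →
    ((l.zipIdx j).foldl (pvFwdStepA h w k) (g, t)).1.length = h ∧
    (∀ X, X < h → ((((l.zipIdx j).foldl (pvFwdStepA h w k) (g, t)).1).getD X []).length = w) ∧
    (∀ X Y, pvGet2 ((l.zipIdx j).foldl (pvFwdStepA h w k) (g, t)).1 X Y =
        if X < k ∨ (X = k ∧ Y < ((pvRows m).getD k []).length)
        then pvFA (pvRows m) h w X Y else 0) ∧
    ((∃ X Y, (X < k ∨ (X = k ∧ Y < ((pvRows m).getD k []).length)) ∧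
        pvCell (pvRows m) X Y = true) → ((l.zipIdx j).foldl (pvFwdStepA h w k) (g, t)).2 = 1) ∧
    ((¬ ∃ X Y, (X < k ∨ (X = k ∧ Y < ((pvRows m).getD k []).length)) ∧
        pvCell (pvRows m) X Y = true) → ((l.zipIdx j).foldl (pvFwdStepA h w k) (g, t)).2 = 0) := by
  intro l
  induction l with
  | nil =>
    intro j g t hl hlen hrl hg ht1 ht0
    have hjlen : ((pvRows m).getD k []).length ≤ j := by
      by_contra hj
      have := congrArg List.length hl
      simp only [List.length_nil, List.length_drop] at this
      omega
    have hagree : ∀ X Y, pvCell (pvRows m) X Y = true →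
        ((X < k ∨ (X = k ∧ Y < j)) ↔ (X < k ∨ (X = k ∧ Y < ((pvRows m).getD k []).length))) := by
      intro X Y hc
      obtain ⟨hX, hY⟩ := pvCell_bounds (pvRows m) X Y hc
      constructor
      · rintro (hXk | ⟨rfl, hYj⟩)
        · exact Or.inl hXk
        · exact Or.inr ⟨rfl, hY⟩
      · rintro (hXk | ⟨rfl, hYl⟩)
        · exact Or.inl hXk
        · exact Or.inr ⟨rfl, by omega⟩
    simp only [List.zipIdx_nil, List.foldl_nil]
    refine ⟨hlen, hrl, pvGpropConv _ h w g _ _ hagree hg, ?_, ?_⟩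
    · intro hex
      exact ht1 ((pvExConv (pvRows m) _ _ hagree).mpr hex)
    · intro hnex
      exact ht0 (fun hex => hnex ((pvExConv (pvRows m) _ _ hagree).mp hex))
  | cons c l' ih =>
    intro j g t hl hlen hrl hg ht1 ht0
    have hrow := hl
    have hjlt : j < ((pvRows m).getD k []).length := by
      by_contra hj
      rw [List.drop_eq_nil_of_le (by omega)] at hl
      exact absurd hl (List.cons_ne_nil c l')
    have hcj : ((pvRows m).getD k [])[j] = c := by
      rw [List.drop_eq_getElem_cons hjlt] at hl
      exact (List.cons.injEq _ _ _ _ ▸ hl).1.symm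
    have hl' : l' = ((pvRows m).getD k []).drop (j+1) := by
      rw [List.drop_eq_getElem_cons hjlt] at hl
      exact ((List.cons.injEq _ _ _ _).mp hl).2
    have hcell : pvCell (pvRows m) k j = (c == '^') := by
      unfold pvCell
      rw [List.getD_eq_getElem _ _ hjlt, hcj]
    have hjw : j < w := by
      have hmem : m.getD k "" ∈ m := by
        rw [List.getD_eq_getElem _ _ hk]
        exact List.getElem_mem _
      have hlen := hw _ hmem
      rw [pvRows_getD] at hjlt
      simp only [String.length_toList] at hjlt
      omega
    have hkh : k < h := by omega
    -- the value written at (k, j) is exactly pvFA k j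
    have he : (if c = '^' then (1:Int) else 0) +
        (if 0 < k ∧ k < h - 1 ∧ 0 < j ∧ j < w - 1 ∧ c = '^' then
          min (pvGet2 g (k - 1) j) (pvGet2 g k (j - 1)) else 0) =
        pvFA (pvRows m) h w k j := by
      rw [pvFA]
      have hind : (if c = '^' then (1:Int) else 0) =
          (if pvCell (pvRows m) k j = true then (1:Int) else 0) := by
        rw [hcell]; simp
      rw [hind]
      congr 1
      by_cases hcond : 0 < k ∧ k < h - 1 ∧ 0 < j ∧ j < w - 1 ∧ c = '^'
      · obtain ⟨h1, h2, h3, h4, h5⟩ := hcond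
        rw [if_pos ⟨h1, h2, h3, h4, h5⟩, dif_pos ⟨h1, h2, h3, h4, by rw [hcell]; simp [h5]⟩]
        rw [hg (k-1) j, if_pos (Or.inl (by omega)), hg k (j-1), if_pos (Or.inr ⟨rfl, by omega⟩)]
      · rw [if_neg hcond, dif_neg ?_]
        intro hcond2
        obtain ⟨h1, h2, h3, h4, h5⟩ := hcond2
        rw [hcell] at h5
        exact hcond ⟨h1, h2, h3, h4, by simpa using h5⟩
    simp only [List.zipIdx_cons, List.foldl_cons]
    have hstep : pvFwdStepA h w k (g, t) (c, j) =
        (pvSet2 g k j (pvFA (pvRows m) h w k j),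
         if 0 < pvFA (pvRows m) h w k j then 1 else t) := by
      unfold pvFwdStepA
      simp only []
      rw [he]
    rw [hstep]
    refine ih (j+1) _ _ hl' (by rw [pvSet2_length]; exact hlen)
      (fun X hX => by rw [pvSet2_rowlen _ _ _ _ _ (by omega)]; exact hrl X hX) ?_ ?_ ?_
    · intro X Y
      rw [pvGet2_set g k j X Y _ (by omega) (by rw [hrl k hkh]; omega)]
      by_cases hXY : X = k ∧ Y = j
      · obtain ⟨rfl, rfl⟩ := hXY
        rw [if_pos ⟨rfl, rfl⟩, if_pos (Or.inr ⟨rfl, by omega⟩)]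
      · rw [if_neg hXY, hg X Y]
        have : (X < k ∨ (X = k ∧ Y < j)) ↔ (X < k ∨ (X = k ∧ Y < j + 1)) := by
          constructor
          · rintro (hXk | ⟨rfl, hYj⟩)
            · exact Or.inl hXk
            · exact Or.inr ⟨rfl, by omega⟩
          · rintro (hXk | ⟨rfl, hYj⟩)
            · exact Or.inl hXk
            · refine Or.inr ⟨rfl, by omega⟩
        exact if_congr this rfl rfl
    · rintro ⟨X, Y, hP, hc⟩
      by_cases hXY : X = k ∧ Y = j
      · obtain ⟨hXk, hYj⟩ := hXY
        rw [hXk, hYj] at hc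
        rw [if_pos (by have := pvFA_pos_of_cell (pvRows m) h w k j hc; omega)]
      · have hP' : X < k ∨ (X = k ∧ Y < j) := by
          rcases hP with hXk | ⟨rfl, hYj⟩
          · exact Or.inl hXk
          · refine Or.inr ⟨rfl, ?_⟩
            rcases Nat.lt_or_ge Y j with h' | h'
            · exact h'
            · exact absurd ⟨rfl, by omega⟩ hXY
        rw [ht1 ⟨X, Y, hP', hc⟩]
        split <;> rfl
    · intro hnex
      have hnc : ¬ pvCell (pvRows m) k j = true := by
        intro hc
        exact hnex ⟨k, j, Or.inr ⟨rfl, by omega⟩, hc⟩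
      rw [pvFA_of_not_cell (pvRows m) h w k j (by simpa using hnc), if_neg (by omega)]
      exact ht0 (fun ⟨X, Y, hP, hc⟩ => hnex ⟨X, Y, by tauto, hc⟩)

theorem pvCell_false_of_len (rows : List (List Char)) (x y : Nat)
    (hx : rows.length ≤ x) : pvCell rows x y = false := by
  by_contra hc
  have := (pvCell_bounds rows x y (by simpa using hc)).1
  omega

theorem pvAfwdOuter (m : List String) (h w : Nat)
    (hh : h = m.length) (hw : ∀ r ∈ m, r.length ≤ w) :
    ∀ (l : List String) (k : Nat) (g : List (List Int)) (t : Int),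
    l = m.drop k →
    g.length = h →
    (∀ X, X < h → (g.getD X []).length = w) →
    (∀ X Y, pvGet2 g X Y = if X < k then pvFA (pvRows m) h w X Y else 0) →
    ((∃ X Y, X < k ∧ pvCell (pvRows m) X Y = true) → t = 1) →
    ((¬ ∃ X Y, X < k ∧ pvCell (pvRows m) X Y = true) → t = 0) →
    ((l.zipIdx k).foldl
        (fun st rx => rx.1.toList.zipIdx.foldl (pvFwdStepA h w rx.2) st) (g, t)).1.length = h ∧
    (∀ X, X < h → ((((l.zipIdx k).foldl
        (fun st rx => rx.1.toList.zipIdx.foldl (pvFwdStepA h w rx.2) st) (g, t)).1).getD X []).length = w) ∧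
    (∀ X Y, pvGet2 ((l.zipIdx k).foldl
        (fun st rx => rx.1.toList.zipIdx.foldl (pvFwdStepA h w rx.2) st) (g, t)).1 X Y =
      pvFA (pvRows m) h w X Y) ∧
    (pvHasCell (pvRows m) → ((l.zipIdx k).foldl
        (fun st rx => rx.1.toList.zipIdx.foldl (pvFwdStepA h w rx.2) st) (g, t)).2 = 1) ∧
    (¬ pvHasCell (pvRows m) → ((l.zipIdx k).foldl
        (fun st rx => rx.1.toList.zipIdx.foldl (pvFwdStepA h w rx.2) st) (g, t)).2 = 0) := by
  intro l
  induction l with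
  | nil =>
    intro k g t hl hlen hrl hg ht1 ht0
    have hk : m.length ≤ k := by
      by_contra hk
      have := congrArg List.length hl
      rw [List.length_drop] at this
      simp at this
      omega
    simp only [List.zipIdx_nil, List.foldl_nil]
    refine ⟨hlen, hrl, ?_, ?_, ?_⟩
    · intro X Y
      rw [hg X Y]
      by_cases hX : X < k
      · rw [if_pos hX]
      · rw [if_neg hX]
        have hcf : pvCell (pvRows m) X Y = false := by
          refine pvCell_false_of_len _ X Y ?_
          simp only [pvRows, List.length_map]
          omega
        rw [pvFA_of_not_cell _ h w X Y hcf]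
    · rintro ⟨X, Y, hc⟩
      refine ht1 ⟨X, Y, ?_, hc⟩
      have := (pvCell_bounds (pvRows m) X Y hc).1
      simp only [pvRows, List.length_map] at this
      omega
    · intro hnc
      exact ht0 (fun ⟨X, Y, _, hc⟩ => hnc ⟨X, Y, hc⟩)
  | cons r l' ih =>
    intro k g t hl hlen hrl hg ht1 ht0
    have hk : k < m.length := by
      by_contra hk
      rw [List.drop_eq_nil_of_le (by omega)] at hl
      exact absurd hl (List.cons_ne_nil r l')
    have hr : m[k] = r := by
      rw [List.drop_eq_getElem_cons hk] at hl
      exact ((List.cons.injEq _ _ _ _).mp hl).1.symm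
    have hl' : l' = m.drop (k+1) := by
      rw [List.drop_eq_getElem_cons hk] at hl
      exact ((List.cons.injEq _ _ _ _).mp hl).2
    have hrowk : (pvRows m).getD k [] = r.toList := by
      rw [pvRows_getD, List.getD_eq_getElem _ _ hk, hr]
    simp only [List.zipIdx_cons, List.foldl_cons]
    have hinner := pvAfwdInner m h w k hh hw hk r.toList 0 g t
      (by rw [List.drop_zero, hrowk])
      hlen hrl
      (by
        intro X Y
        rw [hg X Y]
        exact if_congr (by omega) rfl rfl)
      (by
        rintro ⟨X, Y, hP, hc⟩
        exact ht1 ⟨X, Y, by omega, hc⟩)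
      (by
        intro hnex
        exact ht0 (fun ⟨X, Y, hP, hc⟩ => hnex ⟨X, Y, by omega, hc⟩))
    obtain ⟨i1, i2, i3, i4, i5⟩ := hinner
    have hagree : ∀ X Y, pvCell (pvRows m) X Y = true →
        ((X < k ∨ (X = k ∧ Y < ((pvRows m).getD k []).length)) ↔ (X < k + 1)) := by
      intro X Y hc
      obtain ⟨hX, hY⟩ := pvCell_bounds (pvRows m) X Y hc
      constructor
      · rintro (hXk | ⟨rfl, _⟩) <;> omega
      · intro hXk
        rcases Nat.lt_or_ge X k with h' | h'
        · exact Or.inl h'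
        · have hXe : X = k := by omega
          rw [hXe] at hY
          exact Or.inr ⟨hXe, hY⟩
    refine ih (k+1) _ _ hl' i1 i2 ?_ ?_ ?_
    · exact pvGpropConv _ h w _ _ _ hagree i3
    · rintro ⟨X, Y, hP, hc⟩
      exact i4 ⟨X, Y, (hagree X Y hc).mpr hP, hc⟩
    · intro hnex
      exact i5 (fun ⟨X, Y, hP, hc⟩ => hnex ⟨X, Y, (hagree X Y hc).mp hP, hc⟩)

theorem pvGet2_replicate (n p X Y : Nat) :
    pvGet2 (List.replicate n (List.replicate p (0:Int))) X Y = 0 := by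
  unfold pvGet2
  have hrow : (List.replicate n (List.replicate p (0:Int))).getD X [] =
      if X < n then List.replicate p 0 else [] := by
    rcases Nat.lt_or_ge X n with hX | hX
    · rw [if_pos hX, List.getD_eq_getElem _ _ (by simpa using hX), List.getElem_replicate]
    · rw [if_neg (by omega), List.getD_eq_default _ _ (by simpa using hX)]
  rw [hrow]
  split
  · rcases Nat.lt_or_ge Y p with hY | hY
    · rw [List.getD_eq_getElem _ _ (by simpa using hY), List.getElem_replicate]
    · rw [List.getD_eq_default _ _ (by simpa using hY)]
  · rfl

-- after the first loop: the grid holds pvFA and top flags the existence of a '^'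
theorem pvAfwd_spec (m : List String) (h w : Nat)
    (hh : h = m.length) (hw : ∀ r ∈ m, r.length ≤ w) :
    (pvFwdA h w (List.replicate h (List.replicate w 0), 0) m).1.length = h ∧
    (∀ X, X < h → (((pvFwdA h w (List.replicate h (List.replicate w 0), 0) m).1).getD X []).length = w) ∧
    (∀ X Y, pvGet2 (pvFwdA h w (List.replicate h (List.replicate w 0), 0) m).1 X Y =
        pvFA (pvRows m) h w X Y) ∧
    (pvHasCell (pvRows m) → (pvFwdA h w (List.replicate h (List.replicate w 0), 0) m).2 = 1) ∧
    (¬ pvHasCell (pvRows m) → (pvFwdA h w (List.replicate h (List.replicate w 0), 0) m).2 = 0) := by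
  unfold pvFwdA
  exact pvAfwdOuter m h w hh hw m 0 _ 0 (by rw [List.drop_zero])
    (by rw [List.length_replicate])
    (by
      intro X hX
      rw [List.getD_eq_getElem _ _ (by simpa using hX), List.getElem_replicate,
        List.length_replicate])
    (by intro X Y; rw [if_neg (by omega), pvGet2_replicate])
    (by rintro ⟨X, Y, hX, _⟩; omega)
    (by intro _; rfl)

-- ---- the second loop of A: processed interior cells hold pvGA, top ramps to the max ----
theorem pvAbackInner (rows : List (List Char)) (h w : Nat)
    (x : Nat) (hx0 : 0 < x) (hxh : x + 1 < h) :
    ∀ (n : Nat) (g : List (List Int)) (t : Int), n ≤ w - 2 →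
    g.length = h →
    (∀ X, X < h → (g.getD X []).length = w) →
    (∀ X Y, pvGet2 g X Y =
      if (x < X ∨ (X = x ∧ n < Y)) ∧ (0 < X ∧ X + 1 < h ∧ 0 < Y ∧ Y + 1 < w)
      then pvGA rows h w X Y else pvFA rows h w X Y) →
    0 ≤ t → t ≤ pvM rows h w →
    (pvHasCell rows → 1 ≤ t) → (¬ pvHasCell rows → t = 0) →
    (∀ X Y, (x < X ∨ (X = x ∧ n < Y)) ∧ (0 < X ∧ X + 1 < h ∧ 0 < Y ∧ Y + 1 < w) →
      pvGA rows h w X Y ≤ t) →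
    ((List.range' 1 n).reverse.foldl (pvBackStepA x) (g, t)).1.length = h ∧
    (∀ X, X < h →
      ((((List.range' 1 n).reverse.foldl (pvBackStepA x) (g, t)).1).getD X []).length = w) ∧
    (∀ X Y, pvGet2 ((List.range' 1 n).reverse.foldl (pvBackStepA x) (g, t)).1 X Y =
      if (x < X ∨ (X = x ∧ 0 < Y)) ∧ (0 < X ∧ X + 1 < h ∧ 0 < Y ∧ Y + 1 < w)
      then pvGA rows h w X Y else pvFA rows h w X Y) ∧
    0 ≤ ((List.range' 1 n).reverse.foldl (pvBackStepA x) (g, t)).2 ∧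
    ((List.range' 1 n).reverse.foldl (pvBackStepA x) (g, t)).2 ≤ pvM rows h w ∧
    (pvHasCell rows → 1 ≤ ((List.range' 1 n).reverse.foldl (pvBackStepA x) (g, t)).2) ∧
    (¬ pvHasCell rows → ((List.range' 1 n).reverse.foldl (pvBackStepA x) (g, t)).2 = 0) ∧
    (∀ X Y, (x < X ∨ (X = x ∧ 0 < Y)) ∧ (0 < X ∧ X + 1 < h ∧ 0 < Y ∧ Y + 1 < w) →
      pvGA rows h w X Y ≤ ((List.range' 1 n).reverse.foldl (pvBackStepA x) (g, t)).2) := by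
  intro n
  induction n with
  | zero =>
    intro g t hn hlen hrl hg h0 hM h1 h2 h3
    simp only [List.range'_zero, List.reverse_nil, List.foldl_nil]
    exact ⟨hlen, hrl, hg, h0, hM, h1, h2, h3⟩
  | succ n ih =>
    intro g t hn hlen hrl hg h0 hM h1 h2 h3
    have hrw : (List.range' 1 (n+1)).reverse = (n+1) :: (List.range' 1 n).reverse := by
      have h1n : 1 + 1 * n = n + 1 := by omega
      rw [List.range'_concat, h1n, List.reverse_append, List.reverse_singleton,
        List.singleton_append]
    rw [hrw, List.foldl_cons]
    have hy0 : 0 < n + 1 := by omega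
    have hyw : (n + 1) + 1 < w := by omega
    -- the three grid reads of the step
    have havA : pvGet2 g x (n+1) = pvFA rows h w x (n+1) := by
      rw [hg, if_neg]
      rintro ⟨h', -⟩
      rcases h' with h' | ⟨-, h'⟩ <;> omega
    have havD : pvGet2 g (x+1) (n+1) = pvGA rows h w (x+1) (n+1) := by
      rw [hg]
      by_cases hp : x + 2 < h
      · rw [if_pos ⟨Or.inl (by omega), by omega, by omega, by omega, by omega⟩]
      · rw [if_neg (fun hcond => hp (by omega : x + 1 + 1 < h)),
          pvGA_boundary rows h w (x+1) (n+1) (by omega)]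
    have havR : pvGet2 g x (n+2) = pvGA rows h w x (n+2) := by
      rw [hg]
      by_cases hp : n + 3 < w
      · rw [if_pos ⟨Or.inr ⟨rfl, by omega⟩, by omega, hxh, by omega, by omega⟩]
      · rw [if_neg (fun hcond => hp (by omega : n + 2 + 1 < w)),
          pvGA_boundary rows h w x (n+2) (by omega)]
    have hstep : pvBackStepA x (g, t) (n+1) =
        (pvSet2 g x (n+1) (pvGA rows h w x (n+1)),
         t + (if t < pvGA rows h w x (n+1) then 1 else 0)) := by
      unfold pvBackStepA
      have hv : min (min (pvGet2 g x (n+1)) (pvGet2 g (x+1) (n+1) + 1))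
          (pvGet2 g x (n+1+1) + 1) = pvGA rows h w x (n+1) := by
        rw [havA, havD]
        rw [show n+1+1 = n+2 from rfl, havR, min_assoc,
          ← pvGA_interior rows h w x (n+1) hx0 hxh hy0 hyw]
      rw [hv]
    rw [hstep]
    -- facts about the value just written
    have hGAle : pvGA rows h w x (n+1) ≤ pvM rows h w := by
      rw [pvGA_eq_pvGB]
      exact pvGB_le_pvM rows h w x (n+1) (by omega) (by omega)
    have hGAd : pvGA rows h w x (n+1) ≤ pvGA rows h w (x+1) (n+1) + 1 := by
      rw [pvGA_interior rows h w x (n+1) hx0 hxh hy0 hyw]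
      exact le_trans (min_le_right _ _) (min_le_left _ _)
    have hGAnn := pvGA_nonneg rows h w x (n+1)
    -- new counter facts
    have ht0' : 0 ≤ t + (if t < pvGA rows h w x (n+1) then 1 else 0) := by
      split <;> omega
    have htM' : t + (if t < pvGA rows h w x (n+1) then 1 else 0) ≤ pvM rows h w := by
      split <;> omega
    have ht1' : pvHasCell rows → 1 ≤ t + (if t < pvGA rows h w x (n+1) then 1 else 0) := by
      intro hhc
      have := h1 hhc
      split <;> omega
    have ht2' : ¬ pvHasCell rows → t + (if t < pvGA rows h w x (n+1) then 1 else 0) = 0 := by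
      intro hhc
      have hnc : pvCell rows x (n+1) = false := by
        by_contra hcc
        exact hhc ⟨x, n+1, by simpa using hcc⟩
      rw [pvGA_of_not_cell rows h w x (n+1) hnc, h2 hhc]
      norm_num
    have hproc' : ∀ X Y, (x < X ∨ (X = x ∧ n < Y)) ∧ (0 < X ∧ X + 1 < h ∧ 0 < Y ∧ Y + 1 < w) →
        pvGA rows h w X Y ≤ t + (if t < pvGA rows h w x (n+1) then 1 else 0) := by
      intro X Y ⟨hor, hP⟩
      by_cases hXY : X = x ∧ Y = n + 1
      · obtain ⟨hXe, hYe⟩ := hXY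
        rw [hXe, hYe]
        by_cases hlt : t < pvGA rows h w x (n+1)
        · rw [if_pos hlt]
          rcases lt_or_ge (pvGA rows h w x (n+1)) 2 with hsm | hbg
          · omega
          · have hcc : pvCell rows x (n+1) = true := by
              by_contra hcc
              have := pvGA_of_not_cell rows h w x (n+1) (by simpa using hcc)
              omega
            have ht1'' : 1 ≤ t := h1 ⟨x, n+1, hcc⟩
            by_cases hdint : x + 2 < h
            · have hdproc : pvGA rows h w (x+1) (n+1) ≤ t :=
                h3 (x+1) (n+1) ⟨Or.inl (by omega), by omega, by omega, by omega, by omega⟩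
              omega
            · have := pvGA_le_one_of_not_interior rows h w (x+1) (n+1) (by omega)
              omega
        · rw [if_neg hlt]
          omega
      · have hor' : x < X ∨ (X = x ∧ n + 1 < Y) := by
          rcases hor with h' | ⟨rfl, hYj⟩
          · exact Or.inl h'
          · refine Or.inr ⟨rfl, ?_⟩
            rcases Nat.lt_or_ge (n+1) Y with h'' | h''
            · exact h''
            · exact absurd ⟨rfl, by omega⟩ hXY
        have := h3 X Y ⟨hor', hP⟩
        split <;> omega
    -- new grid invariant
    have hxlen : x < g.length := by omega
    have hylen : n + 1 < (g.getD x []).length := by rw [hrl x (by omega)]; omega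
    refine ih _ _ (by omega) (by rw [pvSet2_length]; exact hlen)
      (fun X hX => by rw [pvSet2_rowlen _ _ _ _ _ hxlen]; exact hrl X hX) ?_ ht0' htM' ht1' ht2' hproc'
    intro X Y
    rw [pvGet2_set g x (n+1) X Y _ hxlen hylen]
    by_cases hXY : X = x ∧ Y = n + 1
    · obtain ⟨hXe, hYe⟩ := hXY
      rw [if_pos ⟨hXe, hYe⟩, hXe, hYe,
        if_pos ⟨Or.inr ⟨rfl, by omega⟩, by omega, hxh, by omega, by omega⟩]
    · rw [if_neg hXY, hg X Y]
      refine if_congr ?_ rfl rfl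
      constructor
      · rintro ⟨hor, hP⟩
        refine ⟨?_, hP⟩
        rcases hor with h' | ⟨hXe, hY'⟩
        · exact Or.inl h'
        · exact Or.inr ⟨hXe, by omega⟩
      · rintro ⟨hor, hP⟩
        refine ⟨?_, hP⟩
        rcases hor with h' | ⟨hXe, hY'⟩
        · exact Or.inl h'
        · refine Or.inr ⟨hXe, ?_⟩
          rcases Nat.lt_or_ge (n+1) Y with h'' | h''
          · exact h''
          · exact absurd ⟨hXe, by omega⟩ hXY

theorem pvAbackOuter (rows : List (List Char)) (h w : Nat) :
    ∀ (n : Nat) (g : List (List Int)) (t : Int), n ≤ h - 2 →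
    g.length = h →
    (∀ X, X < h → (g.getD X []).length = w) →
    (∀ X Y, pvGet2 g X Y =
      if n < X ∧ (0 < X ∧ X + 1 < h ∧ 0 < Y ∧ Y + 1 < w)
      then pvGA rows h w X Y else pvFA rows h w X Y) →
    0 ≤ t → t ≤ pvM rows h w →
    (pvHasCell rows → 1 ≤ t) → (¬ pvHasCell rows → t = 0) →
    (∀ X Y, n < X ∧ (0 < X ∧ X + 1 < h ∧ 0 < Y ∧ Y + 1 < w) → pvGA rows h w X Y ≤ t) →
    0 ≤ ((List.range' 1 n).reverse.foldl
        (fun st x => (List.range' 1 (w - 2)).reverse.foldl (pvBackStepA x) st) (g, t)).2 ∧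
    ((List.range' 1 n).reverse.foldl
        (fun st x => (List.range' 1 (w - 2)).reverse.foldl (pvBackStepA x) st) (g, t)).2 ≤ pvM rows h w ∧
    (pvHasCell rows → 1 ≤ ((List.range' 1 n).reverse.foldl
        (fun st x => (List.range' 1 (w - 2)).reverse.foldl (pvBackStepA x) st) (g, t)).2) ∧
    (¬ pvHasCell rows → ((List.range' 1 n).reverse.foldl
        (fun st x => (List.range' 1 (w - 2)).reverse.foldl (pvBackStepA x) st) (g, t)).2 = 0) ∧
    (∀ X Y, (0 < X ∧ X + 1 < h ∧ 0 < Y ∧ Y + 1 < w) →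
      pvGA rows h w X Y ≤ ((List.range' 1 n).reverse.foldl
        (fun st x => (List.range' 1 (w - 2)).reverse.foldl (pvBackStepA x) st) (g, t)).2) := by
  intro n
  induction n with
  | zero =>
    intro g t hn hlen hrl hg h0 hM h1 h2 h3
    simp only [List.range'_zero, List.reverse_nil, List.foldl_nil]
    exact ⟨h0, hM, h1, h2, fun X Y hP => h3 X Y ⟨hP.1, hP⟩⟩
  | succ n ih =>
    intro g t hn hlen hrl hg h0 hM h1 h2 h3
    have hrw : (List.range' 1 (n+1)).reverse = (n+1) :: (List.range' 1 n).reverse := by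
      have h1n : 1 + 1 * n = n + 1 := by omega
      rw [List.range'_concat, h1n, List.reverse_append, List.reverse_singleton,
        List.singleton_append]
    rw [hrw, List.foldl_cons]
    have hinner := pvAbackInner rows h w (n+1) (by omega) (by omega) (w - 2) g t
      (le_refl _) hlen hrl
      (by
        intro X Y
        rw [hg X Y]
        refine if_congr ?_ rfl rfl
        constructor
        · rintro ⟨hX, hP⟩
          exact ⟨Or.inl hX, hP⟩
        · rintro ⟨hor, hP⟩
          rcases hor with h' | ⟨hXe, hY'⟩
          · exact ⟨by omega, hP⟩
          · exact absurd hY' (by omega))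
      h0 hM h1 h2
      (by
        intro X Y hcond
        obtain ⟨hor, hP⟩ := hcond
        rcases hor with h' | ⟨hXe, hY'⟩
        · exact h3 X Y ⟨by omega, hP⟩
        · exact absurd hY' (by omega))
    obtain ⟨i1, i2, i3, i4, i5, i6, i7, i8⟩ := hinner
    refine ih _ _ (by omega) i1 i2 ?_ i4 i5 i6 i7 ?_
    · intro X Y
      rw [i3 X Y]
      refine if_congr ?_ rfl rfl
      constructor
      · rintro ⟨hor, hP⟩
        rcases hor with h' | ⟨hXe, hY'⟩
        · exact ⟨by omega, hP⟩
        · exact ⟨by omega, hP⟩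
      · rintro ⟨hX, hP⟩
        rcases Nat.lt_or_ge (n+1) X with h' | h'
        · exact ⟨Or.inl h', hP⟩
        · exact ⟨Or.inr ⟨by omega, by omega⟩, hP⟩
    · intro X Y hcond
      obtain ⟨hor, hP⟩ := hcond
      rcases Nat.lt_or_ge (n+1) X with h' | h'
      · exact i8 X Y ⟨Or.inl h', hP⟩
      · exact i8 X Y ⟨Or.inr ⟨by omega, by omega⟩, hP⟩

-- the ramped counter reaches exactly the field maximum
theorem pvRamp_eq_M (rows : List (List Char)) (h w : Nat)
    (hrows : rows.length = h) (hwr : ∀ r ∈ rows, r.length ≤ w) (t : Int)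
    (h0 : 0 ≤ t) (hM : t ≤ pvM rows h w)
    (h1 : pvHasCell rows → 1 ≤ t) (h2 : ¬ pvHasCell rows → t = 0)
    (h3 : ∀ X Y, (0 < X ∧ X + 1 < h ∧ 0 < Y ∧ Y + 1 < w) → pvGA rows h w X Y ≤ t) :
    t = pvM rows h w := by
  have hMnn := pvM_nonneg rows h w
  rcases pvM_attain rows h w with hA | ⟨X, hX, Y, hY, hA⟩
  · by_cases hc : pvHasCell rows
    · obtain ⟨x, y, hcc⟩ := hc
      have := pvM_pos_of_cell rows h w hrows hwr x y hcc
      omega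
    · rw [h2 hc, hA]
  · rcases lt_or_ge (pvM rows h w) 1 with hm | hm
    · have := h2
      by_cases hc : pvHasCell rows
      · have := h1 hc
        omega
      · rw [h2 hc]; omega
    · have hcell : pvCell rows X Y = true := by
        by_contra hc
        have := pvGB_of_not_cell rows h w X Y (by simpa using hc)
        omega
      have hHas : pvHasCell rows := ⟨X, Y, hcell⟩
      have ht1 := h1 hHas
      rcases lt_or_ge (pvM rows h w) 2 with hm2 | hm2
      · omega
      · have hGA : pvGA rows h w X Y = pvM rows h w := by
          rw [pvGA_eq_pvGB]; exact hA
        have hint : 0 < X ∧ X + 1 < h ∧ 0 < Y ∧ Y + 1 < w := by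
          by_contra hni
          have := pvGA_le_one_of_not_interior rows h w X Y hni
          omega
        have := h3 X Y hint
        omega

-- A's port returns the maximum of the final field
theorem pvA_spec (m0 : String) (rest : List String)
    (hw : ∀ r ∈ (m0 :: rest), r.length ≤ m0.length) :
    peak_height (m0 :: rest) =
      pvM (pvRows (m0 :: rest)) (m0 :: rest).length m0.length := by
  have hrows : (pvRows (m0 :: rest)).length = (m0 :: rest).length := by
    simp [pvRows]
  have hwr : ∀ r ∈ pvRows (m0 :: rest), r.length ≤ m0.length := by
    intro r hr
    simp only [pvRows, List.mem_map] at hr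
    obtain ⟨s, hs, rfl⟩ := hr
    simpa [String.length_toList] using hw s hs
  obtain ⟨f1, f2, f3, f4, f5⟩ :=
    pvAfwd_spec (m0 :: rest) (m0 :: rest).length m0.length rfl hw
  have hT0 : 0 ≤ (pvFwdA (m0 :: rest).length m0.length
      (List.replicate (m0 :: rest).length (List.replicate m0.length 0), 0) (m0 :: rest)).2 := by
    by_cases hc : pvHasCell (pvRows (m0 :: rest))
    · rw [f4 hc]; omega
    · rw [f5 hc]
  have hTM : (pvFwdA (m0 :: rest).length m0.length
      (List.replicate (m0 :: rest).length (List.replicate m0.length 0), 0) (m0 :: rest)).2 ≤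
      pvM (pvRows (m0 :: rest)) (m0 :: rest).length m0.length := by
    by_cases hc : pvHasCell (pvRows (m0 :: rest))
    · rw [f4 hc]
      obtain ⟨x, y, hcc⟩ := hc
      exact pvM_pos_of_cell _ _ _ hrows hwr x y hcc
    · rw [f5 hc]
      exact pvM_nonneg _ _ _
  have hback := pvAbackOuter (pvRows (m0 :: rest)) (m0 :: rest).length m0.length
    ((m0 :: rest).length - 2) _ _ (le_refl _) f1 f2
    (by
      intro X Y
      rw [f3 X Y, if_neg]
      rintro ⟨hc1, hP⟩
      omega)
    hT0 hTM (fun hc => by rw [f4 hc]) f5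
    (by
      rintro X Y ⟨hc1, hP⟩
      omega)
  obtain ⟨b1, b2, b3, b4, b5⟩ := hback
  show (pvBackA (m0 :: rest).length m0.length
      (pvFwdA (m0 :: rest).length m0.length
        (List.replicate (m0 :: rest).length (List.replicate m0.length 0), 0) (m0 :: rest))).2 = _
  unfold pvBackA
  exact pvRamp_eq_M _ _ _ hrows hwr _ b1 b2 b3 b4 b5

-- ---- B side: the erosion loop counts up to the field maximum ----

theorem pvGB_le_pvFB (rows : List (List Char)) (h w x y : Nat) :
    pvGB rows h w x y ≤ pvFB rows x y := by
  rw [pvGB]; exact min_le_left _ _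

theorem pvGB_le_down (rows : List (List Char)) (h w x y : Nat) :
    pvGB rows h w x y ≤ (if x + 1 < h then pvGB rows h w (x + 1) y else 0) + 1 := by
  rw [pvGB]
  refine le_trans (min_le_right _ _) (le_trans (min_le_left _ _) ?_)
  split <;> simp_all

theorem pvGB_le_right (rows : List (List Char)) (h w x y : Nat) :
    pvGB rows h w x y ≤ (if y + 1 < w then pvGB rows h w x (y + 1) else 0) + 1 := by
  rw [pvGB]
  refine le_trans (min_le_right _ _) (le_trans (min_le_right _ _) ?_)
  split <;> simp_all

theorem pvCell_false_of_width (rows : List (List Char)) (w x y : Nat)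
    (hwr : ∀ r ∈ rows, r.length ≤ w) (hy : w ≤ y) : pvCell rows x y = false := by
  by_contra hc
  have := (pvCell_lt rows w x y hwr (by simpa using hc)).2
  omega

-- the final field is 1-Lipschitz downward …
theorem pvGB_lip_up (rows : List (List Char)) (h w : Nat) (hrows : rows.length = h) :
    ∀ (x y : Nat), pvGB rows h w (x + 1) y ≤ pvGB rows h w x y + 1 := by
  have H : ∀ (n x y : Nat), w - y ≤ n → pvGB rows h w (x + 1) y ≤ pvGB rows h w x y + 1 := by
    intro n
    induction n with
    | zero =>
      intro x y hn
      have b1 : pvGB rows h w (x + 1) y ≤ pvFB rows x y + 1 := by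
        by_cases hc : pvCell rows (x+1) y = true
        · have h1 : pvGB rows h w (x+1) y ≤ pvFB rows (x+1) y := pvGB_le_pvFB rows h w (x+1) y
          have h2 : pvFB rows (x+1) y ≤ pvFB rows x y + 1 := by
            rw [pvFB, if_pos hc, dif_neg (by omega : ¬ x + 1 = 0)]
            have hx1 : x + 1 - 1 = x := by omega
            rw [hx1]
            have := min_le_left (pvFB rows x y)
              (if _hy : y = 0 then 0 else pvFB rows (x+1) (y-1))
            omega
          omega
        · rw [pvGB_of_not_cell rows h w (x+1) y (by simpa using hc)]
          have := pvFB_nonneg rows x y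
          omega
      have b2 : pvGB rows h w (x + 1) y ≤
          ((if x + 1 < h then pvGB rows h w (x + 1) y else 0) + 1) + 1 := by
        split
        · have := pvGB_nonneg rows h w (x+1) y; omega
        · rename_i hxh
          rw [pvGB_of_not_cell rows h w (x+1) y
            (pvCell_false_of_len rows (x+1) y (by omega))]
          omega
      have b3 : pvGB rows h w (x + 1) y ≤
          ((if y + 1 < w then pvGB rows h w x (y + 1) else 0) + 1) + 1 := by
        have hyw : ¬ y + 1 < w := by omega
        have := pvGB_le_right rows h w (x+1) y
        rw [if_neg hyw] at this ⊢
        omega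
      conv_rhs => rw [pvGB]
      rw [← min_add_add_right, ← min_add_add_right]
      exact le_min b1 (le_min b2 b3)
    | succ n ih =>
      intro x y hn
      have b1 : pvGB rows h w (x + 1) y ≤ pvFB rows x y + 1 := by
        by_cases hc : pvCell rows (x+1) y = true
        · have h1 : pvGB rows h w (x+1) y ≤ pvFB rows (x+1) y := pvGB_le_pvFB rows h w (x+1) y
          have h2 : pvFB rows (x+1) y ≤ pvFB rows x y + 1 := by
            rw [pvFB, if_pos hc, dif_neg (by omega : ¬ x + 1 = 0)]
            have hx1 : x + 1 - 1 = x := by omega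
            rw [hx1]
            have := min_le_left (pvFB rows x y)
              (if _hy : y = 0 then 0 else pvFB rows (x+1) (y-1))
            omega
          omega
        · rw [pvGB_of_not_cell rows h w (x+1) y (by simpa using hc)]
          have := pvFB_nonneg rows x y
          omega
      have b2 : pvGB rows h w (x + 1) y ≤
          ((if x + 1 < h then pvGB rows h w (x + 1) y else 0) + 1) + 1 := by
        split
        · have := pvGB_nonneg rows h w (x+1) y; omega
        · rename_i hxh
          rw [pvGB_of_not_cell rows h w (x+1) y
            (pvCell_false_of_len rows (x+1) y (by omega))]
          omega
      have b3 : pvGB rows h w (x + 1) y ≤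
          ((if y + 1 < w then pvGB rows h w x (y + 1) else 0) + 1) + 1 := by
        by_cases hyw : y + 1 < w
        · rw [if_pos hyw]
          have hA := pvGB_le_right rows h w (x+1) y
          rw [if_pos hyw] at hA
          have hB := ih x (y+1) (by omega)
          omega
        · rw [if_neg hyw]
          have := pvGB_le_right rows h w (x+1) y
          rw [if_neg hyw] at this
          omega
      conv_rhs => rw [pvGB]
      rw [← min_add_add_right, ← min_add_add_right]
      exact le_min b1 (le_min b2 b3)
  intro x y
  exact H (w - y) x y le_rfl

-- … and 1-Lipschitz rightward
theorem pvGB_lip_left (rows : List (List Char)) (h w : Nat)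
    (hwr : ∀ r ∈ rows, r.length ≤ w) :
    ∀ (x y : Nat), pvGB rows h w x (y + 1) ≤ pvGB rows h w x y + 1 := by
  have H : ∀ (n x y : Nat), h - x ≤ n → pvGB rows h w x (y + 1) ≤ pvGB rows h w x y + 1 := by
    intro n
    induction n with
    | zero =>
      intro x y hn
      have b1 : pvGB rows h w x (y + 1) ≤ pvFB rows x y + 1 := by
        by_cases hc : pvCell rows x (y+1) = true
        · have h1 : pvGB rows h w x (y+1) ≤ pvFB rows x (y+1) := pvGB_le_pvFB rows h w x (y+1)
          have h2 : pvFB rows x (y+1) ≤ pvFB rows x y + 1 := by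
            rw [pvFB, if_pos hc, dif_neg (by omega : ¬ y + 1 = 0)]
            have hy1 : y + 1 - 1 = y := by omega
            rw [hy1]
            have := min_le_right (if _hx : x = 0 then (0:Int) else pvFB rows (x-1) (y+1))
              (pvFB rows x y)
            omega
          omega
        · rw [pvGB_of_not_cell rows h w x (y+1) (by simpa using hc)]
          have := pvFB_nonneg rows x y
          omega
      have b2 : pvGB rows h w x (y + 1) ≤
          ((if x + 1 < h then pvGB rows h w (x + 1) y else 0) + 1) + 1 := by
        have hxh : ¬ x + 1 < h := by omega
        have := pvGB_le_down rows h w x (y+1)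
        rw [if_neg hxh] at this ⊢
        omega
      have b3 : pvGB rows h w x (y + 1) ≤
          ((if y + 1 < w then pvGB rows h w x (y + 1) else 0) + 1) + 1 := by
        split
        · have := pvGB_nonneg rows h w x (y+1); omega
        · rename_i hyw
          rw [pvGB_of_not_cell rows h w x (y+1)
            (pvCell_false_of_width rows w x (y+1) hwr (by omega))]
          omega
      conv_rhs => rw [pvGB]
      rw [← min_add_add_right, ← min_add_add_right]
      exact le_min b1 (le_min b2 b3)
    | succ n ih =>
      intro x y hn
      have b1 : pvGB rows h w x (y + 1) ≤ pvFB rows x y + 1 := by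
        by_cases hc : pvCell rows x (y+1) = true
        · have h1 : pvGB rows h w x (y+1) ≤ pvFB rows x (y+1) := pvGB_le_pvFB rows h w x (y+1)
          have h2 : pvFB rows x (y+1) ≤ pvFB rows x y + 1 := by
            rw [pvFB, if_pos hc, dif_neg (by omega : ¬ y + 1 = 0)]
            have hy1 : y + 1 - 1 = y := by omega
            rw [hy1]
            have := min_le_right (if _hx : x = 0 then (0:Int) else pvFB rows (x-1) (y+1))
              (pvFB rows x y)
            omega
          omega
        · rw [pvGB_of_not_cell rows h w x (y+1) (by simpa using hc)]
          have := pvFB_nonneg rows x y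
          omega
      have b2 : pvGB rows h w x (y + 1) ≤
          ((if x + 1 < h then pvGB rows h w (x + 1) y else 0) + 1) + 1 := by
        by_cases hxh : x + 1 < h
        · rw [if_pos hxh]
          have hA := pvGB_le_down rows h w x (y+1)
          rw [if_pos hxh] at hA
          have hB := ih (x+1) y (by omega)
          omega
        · rw [if_neg hxh]
          have := pvGB_le_down rows h w x (y+1)
          rw [if_neg hxh] at this
          omega
      have b3 : pvGB rows h w x (y + 1) ≤
          ((if y + 1 < w then pvGB rows h w x (y + 1) else 0) + 1) + 1 := by
        split
        · have := pvGB_nonneg rows h w x (y+1); omega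
        · rename_i hyw
          rw [pvGB_of_not_cell rows h w x (y+1)
            (pvCell_false_of_width rows w x (y+1) hwr (by omega))]
          omega
      conv_rhs => rw [pvGB]
      rw [← min_add_add_right, ← min_add_add_right]
      exact le_min b1 (le_min b2 b3)
  intro x y
  exact H (h - x) x y le_rfl

-- the membership predicate the k-th erosion layer is proved to satisfy
def pvQ (rows : List (List Char)) (h w : Nat) (k : Nat) (p : Int × Int) : Prop :=
  0 ≤ p.1 ∧ p.1 < (h : Int) ∧ 0 ≤ p.2 ∧ p.2 < (w : Int) ∧
    ((k : Int) + 1) ≤ pvGB rows h w p.1.toNat p.2.toNat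

-- one erosion step moves the layer predicate from k to k+1
theorem pvQ_succ_iff (rows : List (List Char)) (h w : Nat)
    (hrows : rows.length = h) (hwr : ∀ r ∈ rows, r.length ≤ w) (k : Nat) (p : Int × Int) :
    pvQ rows h w (k + 1) p ↔
      pvQ rows h w k p ∧ pvQ rows h w k (p.1 - 1, p.2) ∧ pvQ rows h w k (p.1 + 1, p.2) ∧
      pvQ rows h w k (p.1, p.2 - 1) ∧ pvQ rows h w k (p.1, p.2 + 1) := by
  obtain ⟨i, j⟩ := p
  unfold pvQ
  simp only []
  constructor
  · rintro ⟨hi0, hih, hj0, hjw, hGB⟩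
    set a := i.toNat with ha
    set b := j.toNat with hb
    push_cast at hGB
    have hah : a < h := by omega
    have hbw : b < w := by omega
    -- boundary cells have field value ≤ 1, contradicting hGB
    have hnb : ¬ (a = 0 ∨ b = 0 ∨ ¬ a + 1 < h ∨ ¬ b + 1 < w) := by
      intro hbnd
      have := pvGB_boundary rows h w a b hbnd
      split at this <;> omega
    push_neg at hnb
    obtain ⟨ha0, hb0, hah1, hbw1⟩ := hnb
    have hup : pvGB rows h w a b ≤ pvGB rows h w (a - 1) b + 1 := by
      have := pvGB_lip_up rows h w hrows (a - 1) b
      have he : a - 1 + 1 = a := by omega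
      rw [he] at this
      exact this
    have hdown : pvGB rows h w a b ≤ pvGB rows h w (a + 1) b + 1 := by
      have := pvGB_le_down rows h w a b
      rw [if_pos hah1] at this
      exact this
    have hleft : pvGB rows h w a b ≤ pvGB rows h w a (b - 1) + 1 := by
      have := pvGB_lip_left rows h w hwr a (b - 1)
      have he : b - 1 + 1 = b := by omega
      rw [he] at this
      exact this
    have hright : pvGB rows h w a b ≤ pvGB rows h w a (b + 1) + 1 := by
      have := pvGB_le_right rows h w a b
      rw [if_pos hbw1] at this
      exact this
    have e1 : (i - 1).toNat = a - 1 := by omega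
    have e2 : (i + 1).toNat = a + 1 := by omega
    have e3 : (j - 1).toNat = b - 1 := by omega
    have e4 : (j + 1).toNat = b + 1 := by omega
    refine ⟨⟨hi0, hih, hj0, hjw, by omega⟩,
      ⟨by omega, by omega, hj0, hjw, ?_⟩,
      ⟨by omega, by omega, hj0, hjw, ?_⟩,
      ⟨hi0, hih, by omega, by omega, ?_⟩,
      ⟨hi0, hih, by omega, by omega, ?_⟩⟩
    · rw [e1]; omega
    · rw [e2]; omega
    · rw [e3]; omega
    · rw [e4]; omega
  · rintro ⟨⟨hi0, hih, hj0, hjw, hGB⟩, ⟨hu0, -, -, -, hGBu⟩, ⟨-, hdh, -, -, hGBd⟩,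
      ⟨-, -, hl0, -, hGBl⟩, ⟨-, -, -, hrw, hGBr⟩⟩
    set a := i.toNat with ha
    set b := j.toNat with hb
    have ha0 : 0 < a := by omega
    have hb0 : 0 < b := by omega
    have hah1 : a + 1 < h := by omega
    have hbw1 : b + 1 < w := by omega
    have e1 : (i - 1).toNat = a - 1 := by omega
    have e2 : (i + 1).toNat = a + 1 := by omega
    have e3 : (j - 1).toNat = b - 1 := by omega
    have e4 : (j + 1).toNat = b + 1 := by omega
    rw [e1] at hGBu; rw [e2] at hGBd; rw [e3] at hGBl; rw [e4] at hGBr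
    refine ⟨hi0, hih, hj0, hjw, ?_⟩
    have hcell : pvCell rows a b = true := by
      by_contra hc
      have := pvGB_of_not_cell rows h w a b (by simpa using hc)
      omega
    have hFB : ((k : Int) + 1) + 1 ≤ pvFB rows a b := by
      rw [pvFB, if_pos hcell, dif_neg (by omega : ¬ a = 0), dif_neg (by omega : ¬ b = 0)]
      have hu : ((k : Int) + 1) ≤ pvFB rows (a - 1) b :=
        le_trans hGBu (pvGB_le_pvFB rows h w (a - 1) b)
      have hl : ((k : Int) + 1) ≤ pvFB rows a (b - 1) :=
        le_trans hGBl (pvGB_le_pvFB rows h w a (b - 1))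
      have := le_min hu hl
      omega
    rw [pvGB]
    push_cast
    refine le_min (by omega) (le_min ?_ ?_)
    · rw [dif_pos hah1]; omega
    · rw [dif_pos hbw1]; omega

-- membership in one erosion round
theorem pvMem_pvErode (cells : List (Int × Int)) (p : Int × Int) :
    p ∈ pvErode cells ↔ p ∈ cells ∧ (p.1 - 1, p.2) ∈ cells ∧ (p.1 + 1, p.2) ∈ cells ∧
      (p.1, p.2 - 1) ∈ cells ∧ (p.1, p.2 + 1) ∈ cells := by
  unfold pvErode
  rw [PySem.Set.mem_ofList, List.mem_filter]
  simp [and_assoc]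

-- a nonempty list has an element minimising an Int-valued function
theorem pvExistsMin {α : Type} (f : α → Int) :
    ∀ (l : List α), l ≠ [] → ∃ a ∈ l, ∀ b ∈ l, f a ≤ f b := by
  intro l
  induction l with
  | nil => intro hne; exact absurd rfl hne
  | cons a l ih =>
    intro _
    rcases eq_or_ne l [] with rfl | hne
    · exact ⟨a, by simp, by simp⟩
    · obtain ⟨m, hm, hmin⟩ := ih hne
      rcases le_total (f a) (f m) with hle | hle
      · refine ⟨a, by simp, ?_⟩
        intro b hb
        rcases List.mem_cons.mp hb with rfl | hb
        · exact le_rfl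
        · exact le_trans hle (hmin b hb)
      · refine ⟨m, by simp [hm], ?_⟩
        intro b hb
        rcases List.mem_cons.mp hb with rfl | hb
        · exact hle
        · exact hmin b hb

theorem pvFilter_length_lt {α : Type} (p : α → Bool) :
    ∀ (l : List α) (x : α), x ∈ l → p x = false → (l.filter p).length < l.length := by
  intro l
  induction l with
  | nil => intro x hx; simp at hx
  | cons b l ih =>
    intro x hx hpx
    rcases List.mem_cons.mp hx with rfl | hx'
    · rw [List.filter_cons, if_neg (by simp [hpx])]
      have := List.length_filter_le p l
      simp only [List.length_cons]
      omega
    · have := ih x hx' hpx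
      rw [List.filter_cons]
      split
      · simp only [List.length_cons]; omega
      · simp only [List.length_cons]; omega

-- each round strictly shrinks a non-empty set (the x+y-minimal cell is peeled)
theorem pvErode_length_lt (cells : List (Int × Int)) (hne : cells ≠ []) :
    (pvErode cells).length < cells.length := by
  obtain ⟨p, hp, hmin⟩ := pvExistsMin (fun q : Int × Int => q.1 + q.2) cells hne
  have hnm : (p.1 - 1, p.2) ∉ cells := by
    intro hm
    have := hmin _ hm
    simp only [] at this
    omega
  have hc0 : PySem.Set.contains cells (p.1 - 1, p.2) = false := by
    rw [← Bool.not_eq_true, PySem.Set.contains_iff]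
    exact hnm
  have hpred : (PySem.Set.contains cells (p.1 - 1, p.2) &&
      PySem.Set.contains cells (p.1 + 1, p.2) &&
      PySem.Set.contains cells (p.1, p.2 - 1) &&
      PySem.Set.contains cells (p.1, p.2 + 1)) = false := by
    rw [hc0]
    simp
  refine lt_of_le_of_lt (PySem.Set.length_ofList_le _) ?_
  exact pvFilter_length_lt _ cells p hp hpred

-- the fueled loop returns the field maximum
theorem pvLoop_eq (rows : List (List Char)) (h w : Nat)
    (hrows : rows.length = h) (hwr : ∀ r ∈ rows, r.length ≤ w) :
    ∀ (n k : Nat) (S : List (Int × Int)), S.length < n →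
    (∀ p, p ∈ S ↔ pvQ rows h w k p) → (k : Int) ≤ pvM rows h w →
    pvErodeLoop n S (k : Int) = pvM rows h w := by
  intro n
  induction n with
  | zero => intro k S hS; omega
  | succ n ih =>
    intro k S hlen hmem hk
    simp only [pvErodeLoop]
    by_cases hS : S = []
    · rw [if_pos hS]
      -- the layer is empty: every field value is ≤ k, so the max is exactly k
      have hle : pvM rows h w ≤ (k : Int) := by
        by_contra hgt
        push_neg at hgt
        rcases pvM_attain rows h w with hA | ⟨x, hx, y, hy, hA⟩
        · omega
        · have hQ : pvQ rows h w k ((x : Int), (y : Int)) := by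
            unfold pvQ
            simp only [Int.toNat_natCast]
            omega
          have := (hmem _).mpr hQ
          rw [hS] at this
          simp at this
      omega
    · rw [if_neg hS]
      have hk1 : (k : Int) + 1 ≤ pvM rows h w := by
        obtain ⟨p, hp⟩ := List.exists_mem_of_ne_nil S hS
        obtain ⟨hi0, hih, hj0, hjw, hGB⟩ := (hmem p).mp hp
        have hb : pvGB rows h w p.1.toNat p.2.toNat ≤ pvM rows h w :=
          pvGB_le_pvM rows h w p.1.toNat p.2.toNat (by omega) (by omega)
        omega
      have hmem' : ∀ p, p ∈ pvErode S ↔ pvQ rows h w (k + 1) p := by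
        intro p
        rw [pvMem_pvErode, hmem p, hmem _, hmem _, hmem _, hmem _,
          pvQ_succ_iff rows h w hrows hwr k p]
      have hlen' : (pvErode S).length < n := by
        have := pvErode_length_lt S hS
        omega
      have := ih (k + 1) (pvErode S) hlen' hmem' (by push_cast; omega)
      push_cast at this
      exact this

-- the initial cell set is exactly layer 0
theorem pvCond_eq (m : List String) (a b : Nat) :
    (decide (((b:Int)) < PySem.Str.len (PySem.List.pyGetD m ((a:Int)) "")) &&
     (PySem.Str.pyGet? (PySem.List.pyGetD m ((a:Int)) "") ((b:Int)) == some '^')) =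
    pvCell (pvRows m) a b := by
  unfold pvCell
  rw [pvRows_getD, PySem.List.pyGetD_natCast]
  set s : String := m.getD a "" with hs
  by_cases hb : b < s.toList.length
  · have hb' : b < s.length := by simpa [String.length_toList] using hb
    rw [List.getD_eq_getElem _ _ hb]
    simp [hb']
  · have hb2 : s.toList.length ≤ b := by omega
    have hb' : ¬ b < s.length := by
      simp only [String.length_toList] at hb
      omega
    rw [List.getD_eq_default _ _ hb2]
    simp [hb']

theorem pvMem_pvCellsB (m : List String) (p : Int × Int) :
    p ∈ pvCellsB m (m.length : Int) ((m.headD "").length : Int) ↔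
      0 ≤ p.1 ∧ p.1 < (m.length : Int) ∧ 0 ≤ p.2 ∧ p.2 < ((m.headD "").length : Int) ∧
        pvCell (pvRows m) p.1.toNat p.2.toNat = true := by
  unfold pvCellsB
  rw [PySem.Set.mem_ofList]
  simp only [List.mem_flatMap, List.mem_map, List.mem_filter, PySem.List.mem_pyRange_one]
  constructor
  · rintro ⟨x, ⟨hx0, hxh⟩, y, ⟨⟨hy0, hyw⟩, hcond⟩, rfl⟩
    have hx : x = (x.toNat : Int) := by omega
    have hy : y = (y.toNat : Int) := by omega
    rw [hx, hy, pvCond_eq m x.toNat y.toNat] at hcond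
    refine ⟨hx0, hxh, hy0, hyw, ?_⟩
    simpa using hcond
  · rintro ⟨hi0, hih, hj0, hjw, hc⟩
    refine ⟨p.1, ⟨hi0, hih⟩, p.2, ⟨⟨hj0, hjw⟩, ?_⟩, rfl⟩
    have hx : p.1 = (p.1.toNat : Int) := by omega
    have hy : p.2 = (p.2.toNat : Int) := by omega
    rw [hx, hy, pvCond_eq m p.1.toNat p.2.toNat]
    exact hc


-- B's port returns the maximum of the final field
theorem pvB_spec (m0 : String) (rest : List String)
    (hw : ∀ r ∈ (m0 :: rest), r.length ≤ m0.length) :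
    peak_height_alt (m0 :: rest) =
      pvM (pvRows (m0 :: rest)) (m0 :: rest).length m0.length := by
  have hrows : (pvRows (m0 :: rest)).length = (m0 :: rest).length := by
    simp [pvRows]
  have hwr : ∀ r ∈ pvRows (m0 :: rest), r.length ≤ m0.length := by
    intro r hr
    simp only [pvRows, List.mem_map] at hr
    obtain ⟨s, hs, rfl⟩ := hr
    simpa [String.length_toList] using hw s hs
  show pvErodeLoop _ _ 0 = _
  have h0 : ((0 : Nat) : Int) = (0 : Int) := rfl
  rw [← h0]
  refine pvLoop_eq (pvRows (m0 :: rest)) (m0 :: rest).length m0.length hrows hwr _ 0 _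
    (by omega) ?_ (by exact_mod_cast pvM_nonneg _ _ _)
  intro p
  have hhead : ((m0 :: rest).headD "") = m0 := rfl
  rw [show pvCellsB (m0 :: rest) ((m0 :: rest).length : Int) (m0.length : Int) =
      pvCellsB (m0 :: rest) ((m0 :: rest).length : Int) ((((m0 :: rest).headD "").length : Int))
    from by rw [hhead]]
  rw [pvMem_pvCellsB (m0 :: rest) p]
  unfold pvQ
  rw [hhead]
  constructor
  · rintro ⟨h1, h2, h3, h4, hc⟩
    exact ⟨h1, h2, h3, h4, by
      have := pvGB_pos_of_cell (pvRows (m0 :: rest)) (m0 :: rest).length m0.length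
        p.1.toNat p.2.toNat hc
      push_cast
      omega⟩
  · rintro ⟨h1, h2, h3, h4, hGB⟩
    refine ⟨h1, h2, h3, h4, ?_⟩
    by_contra hc
    have := pvGB_of_not_cell (pvRows (m0 :: rest)) (m0 :: rest).length m0.length
      p.1.toNat p.2.toNat (by simpa using hc)
    push_cast at hGB
    omega

-- ===== VERDICT (by name: the statement is the Claim_ definition above) =====
theorem peak_height_spec : Claim_equal_peak_height := by
  unfold Claim_equal_peak_height
  intro mountain _ hpre
  unfold Spec_peak_height
  obtain ⟨hne, hlen⟩ := hpre
  cases mountain with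
  | nil => exact absurd rfl hne
  | cons m0 rest =>
    have hw : ∀ r ∈ (m0 :: rest), r.length ≤ m0.length := by
      simpa using hlen
    rw [pvA_spec m0 rest hw, pvB_spec m0 rest hw]
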